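-- pv_equiv track=rewrite | github.com/alexolotl1/GithubAPI-Testing | main.py | bucket_repositories
-- ===== SOURCE A (Python) =====
-- from typing import Dict, List, Set
--
-- def bucket_repositories(repos: List[Dict]) -> Dict[str, int]:
--     """
--     Categorize repositories into star ranges.
--
--     Args:
--         repos: List of repository dicts with 'stars' key
--
--     Returns:
--         Dictionary mapping star range labels to counts
--     """
--     buckets = {
--         "0-100": 0,
--         "100-500": 0,
--         "500-1K": 0,
--         "1K-5K": 0,
--         "5K+": 0,
--     }
--
--     for repo in repos:
--         stars = repo.get("stars", 0)
--
--         if stars < 100: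
--             buckets["0-100"] += 1
--         elif stars < 500:
--             buckets["100-500"] += 1
--         elif stars < 1000:
--             buckets["500-1K"] += 1
--         elif stars < 5000:
--             buckets["1K-5K"] += 1
--         else:
--             buckets["5K+"] += 1
--
--     return buckets
-- ===== SOURCE B (Python) =====
-- def bucket_repositories(repos):
--     thresholds = [100, 500, 1000, 5000]
--     labels = ["0-100", "100-500", "500-1K", "1K-5K", "5K+"]
--     buckets = {label: 0 for label in labels}
--     for repo in repos:
--         stars = repo.get("stars", 0)
--         # binary search: index of first threshold strictly greater than stars
--         lo, hi = 0, len(thresholds)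
--         while lo < hi:
--             mid = (lo + hi) // 2
--             if stars < thresholds[mid]:
--                 hi = mid
--             else:
--                 lo = mid + 1
--         buckets[labels[lo]] += 1
--     return buckets
-- ===== Notes on version B (the rewrite author's own statement) =====
-- stated objective: alternative
-- what changed: Replaces the five-way if/elif cascade by a threshold table [100,500,1000,5000] searched with a hand-written bisect_right binary search, with the result dict pre-seeded to zeros from a parallel label list.
import Mathlib
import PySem

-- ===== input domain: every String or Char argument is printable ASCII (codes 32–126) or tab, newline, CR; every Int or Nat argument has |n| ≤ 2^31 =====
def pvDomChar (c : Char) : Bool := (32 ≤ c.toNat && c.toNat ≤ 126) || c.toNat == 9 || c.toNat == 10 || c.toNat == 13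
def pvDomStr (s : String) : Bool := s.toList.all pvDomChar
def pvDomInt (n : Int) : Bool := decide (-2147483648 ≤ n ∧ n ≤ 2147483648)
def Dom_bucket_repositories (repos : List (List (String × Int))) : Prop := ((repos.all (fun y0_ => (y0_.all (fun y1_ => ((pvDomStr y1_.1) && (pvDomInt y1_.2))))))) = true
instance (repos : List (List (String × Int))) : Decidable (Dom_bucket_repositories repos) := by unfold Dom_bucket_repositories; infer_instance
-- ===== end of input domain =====

-- B replaces A's if/elif cascade by a binary search over a threshold table with a
-- parallel label list and a pre-seeded zero dict (objective: alternative, same cost).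

-- ===== PORT A =====
def bucket_repositories (repos : List (List (String × Int))) : List (String × Int) :=
  (repos.foldl (fun b repo =>
      let stars := (PySem.Dict.mk repo).getD "stars" 0
      if stars < 100 then b.modify "0-100" 0 (· + 1)
      else if stars < 500 then b.modify "100-500" 0 (· + 1)
      else if stars < 1000 then b.modify "500-1K" 0 (· + 1)
      else if stars < 5000 then b.modify "1K-5K" 0 (· + 1)
      else b.modify "5K+" 0 (· + 1))
    (PySem.Dict.mk [("0-100", 0), ("100-500", 0), ("500-1K", 0), ("1K-5K", 0), ("5K+", 0)])).items

-- ===== PORT B =====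
def pvThresholds : List Int := [100, 500, 1000, 5000]
def pvLabels : List String := ["0-100", "100-500", "500-1K", "1K-5K", "5K+"]

-- Source B's hand-written while-loop binary search (indices always in range, so getD is exact)
def pvBisect (stars : Int) (lo hi : Nat) : Nat :=
  if lo < hi then
    let mid := (lo + hi) / 2
    if stars < pvThresholds.getD mid 0 then pvBisect stars lo mid
    else pvBisect stars (mid + 1) hi
  else lo
termination_by hi - lo
decreasing_by all_goals omega

def bucket_repositories_alt (repos : List (List (String × Int))) : List (String × Int) :=
  (repos.foldl (fun b repo =>
      let stars := (PySem.Dict.mk repo).getD "stars" 0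
      b.modify (pvLabels.getD (pvBisect stars 0 pvThresholds.length) "") 0 (· + 1))
    (pvLabels.foldl (fun d l => d.insert l 0) PySem.Dict.empty)).items

-- ===== PRECONDITION & SPEC =====
def Spec_bucket_repositories (repos : List (List (String × Int))) (out : List (String × Int)) : Prop := out = bucket_repositories_alt repos
instance (repos : List (List (String × Int))) (out : List (String × Int)) : Decidable (Spec_bucket_repositories repos out) := by unfold Spec_bucket_repositories; infer_instance

-- ===== CLAIM (what is proved, stated in full; the proofs are below) =====
def Claim_equal_bucket_repositories : Prop := ∀ (repos : List (List (String × Int))), Dom_bucket_repositories repos → Spec_bucket_repositories repos (bucket_repositories repos)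

-- ===== LEMMAS AND PROOFS =====

-- the binary search picks exactly the label A's cascade picks
theorem pvLabel_eq (s : Int) :
    pvLabels.getD (pvBisect s 0 pvThresholds.length) "" =
      if s < 100 then "0-100"
      else if s < 500 then "100-500"
      else if s < 1000 then "500-1K"
      else if s < 5000 then "1K-5K"
      else "5K+" := by
  by_cases h1 : s < 100 <;> by_cases h2 : s < 500 <;> by_cases h3 : s < 1000 <;>
    by_cases h4 : s < 5000 <;>
    (repeat (rw [pvBisect]; simp [pvThresholds, pvLabels, h1, h2, h3, h4])) <;> omega

theorem bucket_repositories_spec : Claim_equal_bucket_repositories := by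
  intro repos _
  show bucket_repositories repos = bucket_repositories_alt repos
  unfold bucket_repositories bucket_repositories_alt
  congr 1
  congr 1 <;> first
  | decide
  | (funext b repo; simp only [pvLabel_eq]; split_ifs <;> rfl)
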